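-- pv_equiv track=rewrite | github.com/Tulpana/ARC-AGI-2 | arc_agi_2_submission/ril/small_grid_solver.py | _normalize_grid
-- ===== SOURCE A (Python) =====
-- from typing import Dict, List, Optional, Tuple
--
-- Grid = List[List[int]]
--
-- def _normalize_grid(grid: Grid) -> Grid:
--     """Map colors to sequential integers preserving pattern."""
--     color_map = {}
--     next_id = 0
--     normalized = []
--
--     for row in grid:
--         norm_row = []
--         for cell in row:
--             if cell not in color_map:
--                 color_map[cell] = next_id
--                 next_id += 1
--             norm_row.append(color_map[cell])
--         normalized.append(norm_row)
--
--     return normalized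
-- ===== SOURCE B (Python) =====
-- def _normalize_grid(grid):
--     """Map colors to sequential integers preserving pattern."""
--     flat = [cell for row in grid for cell in row]
--
--     def rank(c):
--         # a color's id = how many distinct colors appear strictly before
--         # its first occurrence in row-major order
--         return len(set(flat[:flat.index(c)]))
--
--     return [[rank(cell) for cell in row] for row in grid]
-- ===== Notes on version B (the rewrite author's own statement) =====
-- stated objective: alternative
-- what changed: B maintains no color table and no running counter at all: each cell's id is computed directly as the number of distinct colors occurring strictly before that color's first occurrence in the flattened grid (len(set(flat[:flat.index(c)]))), trading A's incremental dict construction for a per-cell closed-form count.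
import Mathlib
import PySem

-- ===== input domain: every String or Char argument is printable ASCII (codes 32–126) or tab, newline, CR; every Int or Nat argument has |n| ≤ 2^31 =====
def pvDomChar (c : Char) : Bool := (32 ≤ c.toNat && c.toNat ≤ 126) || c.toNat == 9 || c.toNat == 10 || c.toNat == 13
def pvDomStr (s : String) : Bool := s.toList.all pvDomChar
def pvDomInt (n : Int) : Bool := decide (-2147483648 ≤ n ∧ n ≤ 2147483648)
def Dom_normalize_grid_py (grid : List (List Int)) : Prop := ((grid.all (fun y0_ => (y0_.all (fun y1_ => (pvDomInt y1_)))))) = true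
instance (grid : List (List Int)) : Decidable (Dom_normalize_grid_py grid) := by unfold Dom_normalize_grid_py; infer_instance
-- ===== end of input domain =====

-- B keeps no color table and no counter: each cell's id is computed directly as the number of
-- distinct colors strictly before that color's first occurrence in the flattened grid (alternative, not faster).

-- ===== PORT A =====
def normalize_grid_py (grid : List (List Int)) : List (List Int) :=
  let st := grid.foldl
    (fun (acc : PySem.Dict Int Int × Int × List (List Int)) row =>
      let inner := row.foldl
        (fun (acc2 : PySem.Dict Int Int × Int × List Int) cell =>
          let cm := acc2.1; let n := acc2.2.1; let nr := acc2.2.2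
          let (cm, n) := if cm.contains cell then (cm, n) else (cm.insert cell n, n + 1)
          -- norm_row.append(color_map[cell]): the key is always present at this point; .getD 0 totalizes
          (cm, n, nr ++ [cm.getD cell 0]))
        (acc.1, acc.2.1, ([] : List Int))
      (inner.1, inner.2.1, acc.2.2 ++ [inner.2.2]))
    (PySem.Dict.empty, 0, [])
  st.2.2

-- ===== PORT B =====
def normalize_grid_py_alt (grid : List (List Int)) : List (List Int) :=
  -- flat = [cell for row in grid for cell in row]
  let flat := grid.flatMap id
  -- rank(c) = len(set(flat[:flat.index(c)])); flat.index always succeeds for grid cells, .getD 0 totalizes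
  let rank := fun (c : Int) =>
    ((PySem.Set.ofList (PySem.List.slice flat none
        (some (((PySem.List.index? flat c).getD 0 : Nat) : Int)))).length : Int)
  grid.map (fun row => row.map rank)

-- ===== PRECONDITION & SPEC =====
def Spec_normalize_grid_py (grid : List (List Int)) (out : List (List Int)) : Prop := out = normalize_grid_py_alt grid
instance (grid : List (List Int)) (out : List (List Int)) : Decidable (Spec_normalize_grid_py grid out) := by unfold Spec_normalize_grid_py; infer_instance

-- ===== CLAIM (what is proved, stated in full; the proofs are below) =====
def Claim_equal_normalize_grid_py : Prop := ∀ (grid : List (List Int)), Dom_normalize_grid_py grid → Spec_normalize_grid_py grid (normalize_grid_py grid)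

-- ===== LEMMAS AND PROOFS =====

-- the dict {s[0] ↦ k, s[1] ↦ k+1, …} as a literal items list
def pvDOf (s : List Int) (k : Nat) : PySem.Dict Int Int :=
  PySem.Dict.mk ((s.zipIdx k).map (fun p => (p.1, (p.2 : Int))))

-- the value A assigns to a cell: its index in the first-appearance list of the whole grid
def pvVal (F : List Int) (c : Int) : Int := ((PySem.List.dedup F).idxOf c : Int)

theorem pvDOf_get? (s : List Int) (k : Nat) (c : Int) :
    (pvDOf s k).get? c = if c ∈ s then some ((k + s.idxOf c : Nat) : Int) else none := by
  induction s generalizing k with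
  | nil => simp [pvDOf, PySem.Dict.get?]
  | cons x s ih =>
    have hrec := ih (k + 1)
    simp only [pvDOf, PySem.Dict.get?] at hrec ⊢
    rw [List.zipIdx_cons, List.map_cons, List.find?_cons]
    by_cases hx : x = c
    · subst hx; simp
    · rw [show ((x, (k:Int)).1 == c) = false by simp [hx]]
      rw [hrec]
      by_cases hm : c ∈ s
      · simp only [hm, if_true, List.mem_cons, or_true, List.idxOf_cons]
        rw [show (x == c) = false by simp [hx]]
        simp only [Bool.cond_false]
        congr 1
        omega
      · simp [hm, Ne.symm hx]

theorem pvDOf_contains (s : List Int) (k : Nat) (c : Int) :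
    (pvDOf s k).contains c = decide (c ∈ s) := by
  induction s generalizing k with
  | nil => simp [pvDOf, PySem.Dict.contains]
  | cons x s ih =>
    have hrec := ih (k + 1)
    simp only [pvDOf, PySem.Dict.contains] at hrec ⊢
    simp only [List.zipIdx_cons, List.map_cons, List.any_cons, hrec]
    by_cases hx : x = c
    · simp [hx]
    · rw [show (x == c) = false by simp [hx]]
      simp only [List.mem_cons, Bool.false_or]
      exact decide_eq_decide.mpr ⟨Or.inr, fun h => h.elim (fun h => absurd h.symm hx) id⟩

theorem pvDOf_insert (s : List Int) (k : Nat) (c : Int) (h : c ∉ s) :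
    (pvDOf s k).insert c ((k + s.length : Nat) : Int) = pvDOf (s ++ [c]) k := by
  have hc : (pvDOf s k).contains c = false := by simp [pvDOf_contains, h]
  rw [PySem.Dict.insert, if_neg (by simp [hc])]
  simp [pvDOf, List.zipIdx_append]

theorem pvDedup_append_singleton (p : List Int) (c : Int) :
    PySem.List.dedup (p ++ [c]) =
      if c ∈ p then PySem.List.dedup p else PySem.List.dedup p ++ [c] := by
  have h1 : PySem.Set.ofList (p ++ [c]) = PySem.Set.add (PySem.Set.ofList p) c := by
    simp [PySem.Set.ofList, List.foldl_append]
  have h2 : (PySem.Set.ofList p).contains c = decide (c ∈ p) := by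
    simp [PySem.Set.mem_ofList]
  rw [PySem.List.dedup_eq_ofList, PySem.List.dedup_eq_ofList, h1, PySem.Set.add, h2]
  by_cases hm : c ∈ p <;> simp [hm]

theorem pvDedup_prefix (p q : List Int) :
    ∃ t, PySem.List.dedup (p ++ q) = PySem.List.dedup p ++ t := by
  induction q generalizing p with
  | nil => exact ⟨[], by simp⟩
  | cons x q ih =>
    obtain ⟨t, ht⟩ := ih (p ++ [x])
    rw [show p ++ x :: q = (p ++ [x]) ++ q by simp]
    rw [ht, pvDedup_append_singleton]
    by_cases hm : x ∈ p
    · exact ⟨t, by simp [hm]⟩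
    · exact ⟨[x] ++ t, by simp [hm]⟩

theorem pvIdx_stable (p q : List Int) (c : Int) (h : c ∈ p) :
    (PySem.List.dedup (p ++ q)).idxOf c = (PySem.List.dedup p).idxOf c := by
  obtain ⟨t, ht⟩ := pvDedup_prefix p q
  rw [ht, List.idxOf_append_of_mem]
  rw [PySem.List.dedup_eq_ofList, PySem.Set.mem_ofList]
  exact h

-- A's inner (per-row) loop, characterised against the global first-appearance table
theorem pvInner (F row : List Int) : ∀ (p rest nr : List Int), p ++ (row ++ rest) = F →
    row.foldl
      (fun (acc2 : PySem.Dict Int Int × Int × List Int) cell =>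
        let cm := acc2.1; let n := acc2.2.1; let nr := acc2.2.2
        let (cm, n) := if cm.contains cell then (cm, n) else (cm.insert cell n, n + 1)
        (cm, n, nr ++ [cm.getD cell 0]))
      (pvDOf (PySem.List.dedup p) 0, ((PySem.List.dedup p).length : Int), nr)
    = (pvDOf (PySem.List.dedup (p ++ row)) 0, ((PySem.List.dedup (p ++ row)).length : Int),
        nr ++ row.map (pvVal F)) := by
  induction row with
  | nil => intro p rest nr h; simp
  | cons c row ih =>
    intro p rest nr h
    have hF : (p ++ [c]) ++ (row ++ rest) = F := by
      rw [← h]; simp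
    have hstab : (PySem.List.dedup ((p ++ [c]) ++ (row ++ rest))).idxOf c
        = (PySem.List.dedup (p ++ [c])).idxOf c := pvIdx_stable (p ++ [c]) _ c (by simp)
    have hvF : pvVal F c = ((PySem.List.dedup (p ++ [c])).idxOf c : Int) := by
      rw [pvVal, ← hF, hstab]
    by_cases hm : c ∈ p
    · have hd : PySem.List.dedup (p ++ [c]) = PySem.List.dedup p := by
        rw [pvDedup_append_singleton, if_pos hm]
      have hcd : c ∈ PySem.List.dedup p := by
        rw [PySem.List.dedup_eq_ofList, PySem.Set.mem_ofList]; exact hm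
      have hv : (pvDOf (PySem.List.dedup p) 0).getD c 0 = pvVal F c := by
        rw [PySem.Dict.getD, pvDOf_get?, if_pos hcd, Option.getD_some, hvF, hd]
        simp
      simp only [List.foldl_cons, pvDOf_contains, hcd, decide_true, if_true]
      rw [hv]
      have hrec := ih (p ++ [c]) rest (nr ++ [pvVal F c]) hF
      rw [hd] at hrec
      simpa [List.append_assoc] using hrec
    · have hcd : c ∉ PySem.List.dedup p := by
        rw [PySem.List.dedup_eq_ofList, PySem.Set.mem_ofList]; exact hm
      have hd : PySem.List.dedup (p ++ [c]) = PySem.List.dedup p ++ [c] := by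
        rw [pvDedup_append_singleton, if_neg hm]
      have hins : (pvDOf (PySem.List.dedup p) 0).insert c ((PySem.List.dedup p).length : Int)
          = pvDOf (PySem.List.dedup (p ++ [c])) 0 := by
        have h0 := pvDOf_insert (PySem.List.dedup p) 0 c hcd
        rw [hd]
        simpa using h0
      have hv : (pvDOf (PySem.List.dedup (p ++ [c])) 0).getD c 0 = pvVal F c := by
        have hmem : c ∈ PySem.List.dedup (p ++ [c]) := by rw [hd]; simp
        rw [PySem.Dict.getD, pvDOf_get?, if_pos hmem, Option.getD_some, hvF]
        simp
      have hlen : ((PySem.List.dedup (p ++ [c])).length : Int)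
          = ((PySem.List.dedup p).length : Int) + 1 := by rw [hd]; simp
      simp only [List.foldl_cons, pvDOf_contains, hcd, decide_false, Bool.false_eq_true,
        if_false]
      rw [hins, hv, ← hlen]
      have hrec := ih (p ++ [c]) rest (nr ++ [pvVal F c]) hF
      simpa [List.append_assoc] using hrec

-- A's outer loop
theorem pvOuter (F : List Int) (rows : List (List Int)) :
    ∀ (p : List Int) (norm : List (List Int)), p ++ rows.flatMap id = F →
    rows.foldl
      (fun (acc : PySem.Dict Int Int × Int × List (List Int)) row =>
        let inner := row.foldl
          (fun (acc2 : PySem.Dict Int Int × Int × List Int) cell =>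
            let cm := acc2.1; let n := acc2.2.1; let nr := acc2.2.2
            let (cm, n) := if cm.contains cell then (cm, n) else (cm.insert cell n, n + 1)
            (cm, n, nr ++ [cm.getD cell 0]))
          (acc.1, acc.2.1, ([] : List Int))
        (inner.1, inner.2.1, acc.2.2 ++ [inner.2.2]))
      (pvDOf (PySem.List.dedup p) 0, ((PySem.List.dedup p).length : Int), norm)
    = (pvDOf (PySem.List.dedup (p ++ rows.flatMap id)) 0,
        ((PySem.List.dedup (p ++ rows.flatMap id)).length : Int),
        norm ++ rows.map (fun row => row.map (pvVal F))) := by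
  induction rows with
  | nil => intro p norm h; simp
  | cons row rows ih =>
    intro p norm h
    have h' : p ++ (row ++ rows.flatMap id) = F := by simpa using h
    simp only [List.foldl_cons]
    rw [pvInner F row p (rows.flatMap id) [] h']
    have hrec := ih (p ++ row) (norm ++ [row.map (pvVal F)])
      (by simpa [List.append_assoc] using h)
    simpa [List.append_assoc] using hrec

-- idxOf past a prefix not containing c
theorem pvIdxOf_skip (l t : List Int) (c : Int) (h : c ∉ l) :
    (l ++ c :: t).idxOf c = l.length := by
  induction l with
  | nil => simp
  | cons x l ih =>
    have hx : x ≠ c := fun he => h (by simp [he])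
    have := ih (fun hm => h (by simp [hm]))
    simp only [List.cons_append, List.idxOf_cons, List.length_cons]
    rw [show (x == c) = false by simp [hx]]
    simp [this]

-- the rank of c's first occurrence: |distinct colors before it| = c's index in the dedup list
theorem pvRank (pre suf : List Int) (c : Int) (h : c ∉ pre) :
    ((PySem.Set.ofList pre).length : Int) = pvVal (pre ++ c :: suf) c := by
  have hd1 : PySem.List.dedup (pre ++ [c]) = PySem.List.dedup pre ++ [c] := by
    rw [pvDedup_append_singleton, if_neg h]
  obtain ⟨t, ht⟩ := pvDedup_prefix (pre ++ [c]) suf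
  have hF : pre ++ c :: suf = (pre ++ [c]) ++ suf := by simp
  have hcd : c ∉ PySem.List.dedup pre := by
    rw [PySem.List.dedup_eq_ofList, PySem.Set.mem_ofList]; exact h
  rw [pvVal, hF, ht, hd1]
  rw [show PySem.List.dedup pre ++ [c] ++ t = PySem.List.dedup pre ++ c :: t by simp]
  rw [pvIdxOf_skip _ _ _ hcd, PySem.List.dedup_eq_ofList]

-- B computes pvVal at every cell
theorem pvAlt_eq_map (grid : List (List Int)) :
    normalize_grid_py_alt grid =
      grid.map (fun row => row.map (pvVal (grid.flatMap id))) := by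
  unfold normalize_grid_py_alt
  apply List.map_congr_left
  intro row hrow
  apply List.map_congr_left
  intro c hc
  have hmem : c ∈ grid.flatMap id := List.mem_flatMap.mpr ⟨row, hrow, hc⟩
  obtain ⟨k, hk⟩ := Option.isSome_iff_exists.mp
    ((PySem.List.index?_isSome_iff (grid.flatMap id) c).mpr hmem)
  obtain ⟨pre, suf, hsplit, hlen, hpre⟩ := (PySem.List.index?_eq_some_iff _ _ _).mp hk
  rw [hk, Option.getD_some, PySem.List.slice_to_natCast, hsplit, ← hlen,
    List.take_left, ← pvRank pre suf c hpre]

-- ===== VERDICT (by name: the statement is the Claim_ definition above) =====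
theorem normalize_grid_py_spec : Claim_equal_normalize_grid_py := by
  intro grid _
  show normalize_grid_py grid = normalize_grid_py_alt grid
  rw [pvAlt_eq_map]
  unfold normalize_grid_py
  have h0 : pvDOf (PySem.List.dedup ([] : List Int)) 0 = PySem.Dict.empty := rfl
  have h1 : ((PySem.List.dedup ([] : List Int)).length : Int) = 0 := rfl
  have hout := pvOuter (grid.flatMap id) grid [] [] (by simp)
  rw [h0, h1] at hout
  simp only [List.nil_append] at hout
  rw [hout]
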